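-- pv_equiv track=rewrite | github.com/PrinceSinghhub/GFG-Questions | You and your books.py | max_Books
-- ===== SOURCE A (Python) =====
-- def max_Books(n, k, arr):
--     curr,ans=0,0
--     for item in arr:
--         if item<=k:
--             curr+=item
--         else:
--             ans=max(ans,curr)
--             curr=0
--     return max(ans,curr)
-- ===== SOURCE B (Python) =====
-- def max_Books(n, k, arr):
--     # Prefix-sum / barrier-position approach: barriers (items > k) contribute 0
--     # to a prefix-sum array, so the sum of each maximal run of items <= k is a
--     # difference of two prefix sums taken at consecutive segment boundaries.
--     pre = [0]
--     for x in arr: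
--         pre.append(pre[-1] + (x if x <= k else 0))
--     cuts = [i for i, x in enumerate(arr) if x > k]
--     bounds = [0] + [c + 1 for c in cuts] + [len(arr)]
--     return max(0, max(pre[b] - pre[a] for a, b in zip(bounds, bounds[1:])))
-- ===== Notes on version B (the rewrite author's own statement) =====
-- stated objective: alternative
-- what changed: B replaces A's single running-accumulator scan (curr/ans) by an index-arithmetic algorithm: it builds a prefix-sum array in which barriers contribute 0, collects the barrier positions, and obtains each maximal-run sum as a difference of two prefix sums at consecutive segment boundaries, finally flooring the maximum at 0.
import Mathlib
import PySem

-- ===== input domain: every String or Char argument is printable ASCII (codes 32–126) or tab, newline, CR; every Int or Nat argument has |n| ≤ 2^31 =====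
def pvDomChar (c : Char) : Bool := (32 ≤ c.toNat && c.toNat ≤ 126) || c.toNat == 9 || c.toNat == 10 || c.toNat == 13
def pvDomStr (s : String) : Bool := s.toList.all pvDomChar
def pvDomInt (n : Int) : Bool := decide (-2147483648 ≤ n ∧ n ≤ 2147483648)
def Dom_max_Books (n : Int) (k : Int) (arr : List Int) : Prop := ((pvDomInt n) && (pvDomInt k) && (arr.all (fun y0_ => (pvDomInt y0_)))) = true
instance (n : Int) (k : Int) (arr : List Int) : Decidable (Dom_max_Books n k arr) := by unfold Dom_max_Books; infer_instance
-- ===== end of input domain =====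

-- B replaces A's running-accumulator scan by prefix sums (barriers contribute 0) plus
-- barrier positions: each run sum is a difference of prefix sums at consecutive bounds.

-- ===== PORT A =====
-- literal port of A: single fold over arr carrying (curr, ans), then max ans curr
def max_Books (n : Int) (k : Int) (arr : List Int) : Int :=
  let p := arr.foldl
    (fun (st : Int × Int) item =>
      if item ≤ k then (st.1 + item, st.2) else (0, max st.2 st.1))
    (0, 0)
  max p.2 p.1

-- ===== PORT B =====
-- pre = [0]; for x in arr: pre.append(pre[-1] + (x if x <= k else 0))
-- (the recursion carries pre[-1] as the accumulator and emits the appended values)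
def pvPreAux (k : Int) (acc : Int) : List Int → List Int
  | [] => []
  | x :: xs => (acc + (if x ≤ k then x else 0)) :: pvPreAux k (acc + (if x ≤ k then x else 0)) xs

def pvPre (k : Int) (arr : List Int) : List Int := 0 :: pvPreAux k 0 arr

-- cuts = [i for i, x in enumerate(arr) if x > k]
def pvCuts (k : Int) (arr : List Int) : List Int :=
  (PySem.List.enumerate arr).filterMap (fun p => if k < p.2 then some p.1 else none)

-- bounds = [0] + [c + 1 for c in cuts] + [len(arr)]
def pvBounds (k : Int) (arr : List Int) : List Int :=
  0 :: ((pvCuts k arr).map (fun c => c + 1) ++ [(arr.length : Int)])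

-- the generator (pre[b] - pre[a] for a, b in zip(bounds, bounds[1:]))
def pvDiffs (pre : List Int) (bounds : List Int) : List Int :=
  (bounds.zip bounds.tail).map
    (fun ab => PySem.List.pyGetD pre ab.2 0 - PySem.List.pyGetD pre ab.1 0)

-- max(0, max(...)); the generator is never empty (bounds has ≥ 2 entries), so the
-- `none` branch of Python's max is unreachable and ported as 0
def max_Books_alt (n : Int) (k : Int) (arr : List Int) : Int :=
  let segs := pvDiffs (pvPre k arr) (pvBounds k arr)
  match PySem.List.max? segs (fun y => y) with
  | some m => max 0 m
  | none => 0

-- ===== PRECONDITION & SPEC =====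
def Spec_max_Books (n : Int) (k : Int) (arr : List Int) (out : Int) : Prop := out = max_Books_alt n k arr
instance (n : Int) (k : Int) (arr : List Int) (out : Int) : Decidable (Spec_max_Books n k arr out) := by unfold Spec_max_Books; infer_instance

-- ===== CLAIM (what is proved, stated in full; the proofs are below) =====
def Claim_equal_max_Books : Prop := ∀ (n : Int) (k : Int) (arr : List Int), Dom_max_Books n k arr → Spec_max_Books n k arr (max_Books n k arr)

-- ===== LEMMAS AND PROOFS =====

-- proof-side view: the list of run sums (one entry per maximal run of items ≤ k,
-- empty runs included as 0; always nonempty)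
def pvRunSums (k : Int) : List Int → List Int
  | [] => [0]
  | x :: xs =>
    if x ≤ k then
      match pvRunSums k xs with
      | [] => [x]
      | s :: ss => (x + s) :: ss
    else 0 :: pvRunSums k xs

def pvAddHead (c : Int) : List Int → List Int
  | [] => [c]
  | s :: ss => (c + s) :: ss

def pvMaxL : List Int → Int
  | [] => 0
  | s :: ss => ss.foldl max s

theorem pvRunSums_ne_nil (k : Int) (xs : List Int) : pvRunSums k xs ≠ [] := by
  cases xs with
  | nil => simp [pvRunSums]
  | cons x xs =>
      simp only [pvRunSums]
      split
      · cases h : pvRunSums k xs <;> simp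
      · simp

theorem pv_foldl_max_max (R : List Int) : ∀ (a b : Int),
    List.foldl max (max a b) R = max a (List.foldl max b R) := by
  induction R with
  | nil => intro a b; simp
  | cons r R ih =>
      intro a b
      simp only [List.foldl_cons, max_assoc]
      exact ih a (max b r)

theorem pvPreAux_shift (k : Int) (xs : List Int) : ∀ (a : Int),
    pvPreAux k a xs = (pvPreAux k 0 xs).map (fun v => a + v) := by
  induction xs with
  | nil => intro a; simp [pvPreAux]
  | cons x xs ih =>
      intro a
      simp only [pvPreAux, zero_add, List.map_cons]
      congr 1
      rw [ih (a + (if x ≤ k then x else 0)), ih (if x ≤ k then x else 0), List.map_map]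
      congr 1
      funext v
      simp [add_assoc]

theorem pvPre_cons (k x : Int) (xs : List Int) :
    pvPre k (x :: xs) = 0 :: (pvPre k xs).map (fun v => (if x ≤ k then x else 0) + v) := by
  simp only [pvPre, pvPreAux, zero_add, List.map_cons, add_zero]
  congr 1
  rw [pvPreAux_shift]

theorem pvCuts_shift (k : Int) (xs : List Int) : ∀ (s : Int),
    (PySem.List.enumerate xs (s + 1)).filterMap (fun p => if k < p.2 then some p.1 else none)
      = ((PySem.List.enumerate xs s).filterMap (fun p => if k < p.2 then some p.1 else none)).map
          (fun c => c + 1) := by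
  induction xs with
  | nil => intro s; simp [PySem.List.enumerate]
  | cons x xs ih =>
      intro s
      rw [PySem.List.enumerate_cons, PySem.List.enumerate_cons]
      by_cases h : k < x
      · simp only [List.filterMap_cons, h, if_pos, List.map_cons]
        rw [ih (s + 1)]
      · simp only [List.filterMap_cons, h, if_neg, not_false_iff]
        rw [ih (s + 1)]

theorem pvCuts_cons (k x : Int) (xs : List Int) :
    pvCuts k (x :: xs)
      = (if k < x then [(0 : Int)] else []) ++ (pvCuts k xs).map (fun c => c + 1) := by
  simp only [pvCuts, PySem.List.enumerate_cons, List.filterMap_cons]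
  by_cases h : k < x
  · simp only [h, if_pos]
    rw [show ((0 : Int) + 1) = (0 : Int) + 1 from rfl, pvCuts_shift k xs 0]
    simp
  · simp only [h, if_neg, not_false_iff]
    rw [pvCuts_shift k xs 0]
    simp

theorem pvBounds_mem (k : Int) (xs : List Int) :
    ∀ b ∈ pvBounds k xs, 0 ≤ b ∧ b ≤ (xs.length : Int) := by
  intro b hb
  simp only [pvBounds, List.mem_cons, List.mem_append, List.mem_map,
    List.not_mem_nil, or_false] at hb
  rcases hb with rfl | ⟨c, hc, rfl⟩ | rfl
  · exact ⟨le_refl 0, Int.natCast_nonneg _⟩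
  · simp only [pvCuts, List.mem_filterMap] at hc
    obtain ⟨p, hp, hpc⟩ := hc
    rw [PySem.List.mem_enumerate_iff] at hp
    obtain ⟨j, hj, rfl⟩ := hp
    split at hpc
    · cases hpc
      simp only [zero_add]
      omega
    · cases hpc
  · exact ⟨Int.natCast_nonneg _, le_refl _⟩

theorem pyGetD_cons_succ (p : Int) (pre : List Int) (b : Int) (hb : 0 ≤ b) :
    PySem.List.pyGetD (p :: pre) (b + 1) 0 = PySem.List.pyGetD pre b 0 := by
  rw [PySem.List.pyGetD_of_nonneg _ _ (by omega), PySem.List.pyGetD_of_nonneg _ _ hb]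
  have h1 : (b + 1).toNat = b.toNat + 1 := by omega
  rw [h1]
  rfl

theorem pyGetD_map_add (d : Int) (pre : List Int) (b : Int)
    (hb : 0 ≤ b) (hlt : b < (pre.length : Int)) :
    PySem.List.pyGetD (pre.map (fun v => d + v)) b 0 = d + PySem.List.pyGetD pre b 0 := by
  rw [PySem.List.pyGetD_of_nonneg _ _ hb, PySem.List.pyGetD_of_nonneg _ _ hb]
  have hlt' : b.toNat < pre.length := by omega
  rw [List.getD_eq_getElem _ _ (by simpa using hlt'), List.getD_eq_getElem _ _ hlt',
    List.getElem_map]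

theorem pyGetD_cons_zero (c : Int) (l : List Int) : PySem.List.pyGetD (c :: l) 0 0 = c := by
  rw [PySem.List.pyGetD_of_nonneg _ _ (le_refl 0)]
  rfl

theorem pvDiffs_cons₂ (pre : List Int) (a b : Int) (rest : List Int) :
    pvDiffs pre (a :: b :: rest)
      = (PySem.List.pyGetD pre b 0 - PySem.List.pyGetD pre a 0) :: pvDiffs pre (b :: rest) := by
  simp [pvDiffs]

theorem pvDiffs_shift (p : Int) (pre : List Int) : ∀ (bs : List Int),
    (∀ b ∈ bs, 0 ≤ b) → pvDiffs (p :: pre) (bs.map (fun c => c + 1)) = pvDiffs pre bs := by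
  intro bs
  induction bs with
  | nil => intro _; simp [pvDiffs]
  | cons a bs ih =>
      intro h
      cases bs with
      | nil => simp [pvDiffs]
      | cons b rest =>
          simp only [List.map_cons]
          rw [pvDiffs_cons₂, pvDiffs_cons₂]
          rw [pyGetD_cons_succ p pre a (h a (by simp)),
            pyGetD_cons_succ p pre b (h b (by simp))]
          congr 1
          have := ih (fun x hx => h x (List.mem_cons_of_mem _ hx))
          simpa using this

theorem pvDiffs_map_add (d : Int) (pre : List Int) : ∀ (bs : List Int),
    (∀ b ∈ bs, 0 ≤ b ∧ b < (pre.length : Int)) →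
    pvDiffs (pre.map (fun v => d + v)) bs = pvDiffs pre bs := by
  intro bs
  induction bs with
  | nil => intro _; simp [pvDiffs]
  | cons a bs ih =>
      intro h
      cases bs with
      | nil => simp [pvDiffs]
      | cons b rest =>
          rw [pvDiffs_cons₂, pvDiffs_cons₂]
          obtain ⟨ha0, halt⟩ := h a (by simp)
          obtain ⟨hb0, hblt⟩ := h b (by simp)
          rw [pyGetD_map_add d pre a ha0 halt, pyGetD_map_add d pre b hb0 hblt]
          have := ih (fun x hx => h x (List.mem_cons_of_mem _ hx))
          rw [this]
          ring_nf

theorem pvDiffs_zero_cons_shift (p : Int) (pre : List Int) (r0 : Int) (r1 : List Int)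
    (h : ∀ b ∈ r0 :: r1, 0 ≤ b) :
    pvDiffs (p :: pre) (0 :: (r0 :: r1).map (fun c => c + 1))
      = (PySem.List.pyGetD pre r0 0 - p) :: pvDiffs pre (r0 :: r1) := by
  simp only [List.map_cons]
  rw [pvDiffs_cons₂]
  rw [pyGetD_cons_succ p pre r0 (h r0 (by simp)), pyGetD_cons_zero]
  congr 1
  have := pvDiffs_shift p pre (r0 :: r1) h
  simpa using this

theorem pvPre_length (k : Int) (xs : List Int) : (pvPre k xs).length = xs.length + 1 := by
  suffices h : ∀ (a : Int), (pvPreAux k a xs).length = xs.length by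
    simp [pvPre, h]
  induction xs with
  | nil => intro a; simp [pvPreAux]
  | cons x xs ih => intro a; simp [pvPreAux, ih]

theorem pvPre_head (k : Int) (xs : List Int) :
    PySem.List.pyGetD (pvPre k xs) 0 0 = 0 := by
  rw [PySem.List.pyGetD_of_nonneg _ _ (le_refl 0)]
  rfl

-- the B-side computation equals the run-sum list
theorem pvSegs_eq_runSums (k : Int) : ∀ (xs : List Int),
    pvDiffs (pvPre k xs) (pvBounds k xs) = pvRunSums k xs := by
  intro xs
  induction xs with
  | nil => rfl
  | cons x xs ih =>
      have hmem := pvBounds_mem k xs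
      have hlen := pvPre_length k xs
      have hmem'' : ∀ b ∈ pvBounds k xs, 0 ≤ b ∧ b < ((pvPre k xs).length : Int) := by
        intro b hb
        obtain ⟨h1, h2⟩ := hmem b hb
        exact ⟨h1, by rw [hlen]; push_cast; omega⟩
      -- the tail of pvBounds k xs, always nonempty
      obtain ⟨r0, r1, hr⟩ : ∃ r0 r1,
          (pvCuts k xs).map (fun c => c + 1) ++ [(xs.length : Int)] = r0 :: r1 := by
        cases hc : (pvCuts k xs).map (fun c => c + 1) with
        | nil => exact ⟨(xs.length : Int), [], by simp⟩
        | cons a t => exact ⟨a, t ++ [(xs.length : Int)], by simp⟩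
      have hBxs : pvBounds k xs = 0 :: r0 :: r1 := by simp [pvBounds, hr]
      have hnn : ∀ b ∈ r0 :: r1, 0 ≤ b := by
        intro b hb
        exact (hmem b (by rw [hBxs]; exact List.mem_cons_of_mem _ hb)).1
      have hnn' : ∀ b ∈ r0 :: r1, 0 ≤ b ∧ b < ((pvPre k xs).length : Int) := by
        intro b hb
        exact hmem'' b (by rw [hBxs]; exact List.mem_cons_of_mem _ hb)
      have hIH : (PySem.List.pyGetD (pvPre k xs) r0 0) :: pvDiffs (pvPre k xs) (r0 :: r1)
          = pvRunSums k xs := by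
        rw [← ih, hBxs, pvDiffs_cons₂, pvPre_head, sub_zero]
      by_cases h : x ≤ k
      · -- x joins the current run
        have hbounds : pvBounds k (x :: xs)
            = 0 :: ((r0 :: r1).map (fun c => c + 1)) := by
          simp only [pvBounds, pvCuts_cons, not_lt.mpr h, if_neg, List.nil_append,
            List.length_cons, ← hr, List.map_append, List.map_map, List.map_cons, List.map_nil]
          push_cast
          rfl
        have hpre : pvPre k (x :: xs) = 0 :: (pvPre k xs).map (fun v => x + v) := by
          rw [pvPre_cons]; simp [h]
        rw [hbounds, hpre]
        rw [pvDiffs_zero_cons_shift 0 _ r0 r1 hnn]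
        rw [pvDiffs_map_add x (pvPre k xs) (r0 :: r1) hnn']
        rw [pyGetD_map_add x (pvPre k xs) r0 (hnn' r0 (by simp)).1 (hnn' r0 (by simp)).2]
        simp only [pvRunSums, h, if_pos, ← hIH, sub_zero]
      · -- x is a barrier
        have hx : k < x := lt_of_not_ge h
        have hbounds : pvBounds k (x :: xs)
            = 0 :: ((0 :: r0 :: r1).map (fun c => c + 1)) := by
          simp only [pvBounds, pvCuts_cons, hx, if_pos, List.cons_append, List.length_cons,
            ← hr, List.map_append, List.map_map, List.map_cons, List.map_nil]
          push_cast
          rfl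
        have hpre : pvPre k (x :: xs) = 0 :: pvPre k xs := by
          rw [pvPre_cons]
          have : ¬ (x ≤ k) := h
          simp [this]
        rw [hbounds, hpre]
        have hnn0 : ∀ b ∈ (0 : Int) :: r0 :: r1, 0 ≤ b := by
          intro b hb
          rcases List.mem_cons.mp hb with rfl | hb
          · exact le_refl 0
          · exact hnn b hb
        rw [pvDiffs_zero_cons_shift 0 (pvPre k xs) 0 (r0 :: r1) (by
          intro b hb
          rcases List.mem_cons.mp hb with rfl | hb
          · exact le_refl 0
          · exact hnn b hb)]
        rw [pvPre_head, ← hBxs, ih]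
        simp [pvRunSums, h]

-- the A-side fold computes the running maximum of the run sums (head offset by curr)
theorem pv_mainA (k : Int) : ∀ (xs : List Int) (curr ans : Int), 0 ≤ ans →
    (let p := xs.foldl
        (fun (st : Int × Int) item =>
          if item ≤ k then (st.1 + item, st.2) else (0, max st.2 st.1))
        (curr, ans)
     max p.2 p.1)
    = max ans (pvMaxL (pvAddHead curr (pvRunSums k xs))) := by
  intro xs
  induction xs with
  | nil =>
      intro curr ans hans
      simp only [List.foldl_nil, pvRunSums, pvAddHead, pvMaxL, List.foldl_nil, add_zero]
  | cons x xs ih =>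
      intro curr ans hans
      by_cases h : x ≤ k
      · simp only [List.foldl_cons, h, if_pos]
        have := ih (curr + x) ans hans
        simp only at this
        rw [this]
        obtain ⟨s, ss, hs⟩ : ∃ s ss, pvRunSums k xs = s :: ss := by
          cases hr : pvRunSums k xs with
          | nil => exact absurd hr (pvRunSums_ne_nil k xs)
          | cons a t => exact ⟨a, t, rfl⟩
        simp only [pvRunSums, h, if_pos, hs, pvAddHead]
        ring_nf
      · simp only [List.foldl_cons, h, if_neg, not_false_iff]
        have := ih 0 (max ans curr) (le_max_of_le_left hans)
        simp only at this
        rw [this]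
        obtain ⟨s, ss, hs⟩ : ∃ s ss, pvRunSums k xs = s :: ss := by
          cases hr : pvRunSums k xs with
          | nil => exact absurd hr (pvRunSums_ne_nil k xs)
          | cons a t => exact ⟨a, t, rfl⟩
        simp only [pvRunSums, h, if_neg, not_false_iff, hs, pvAddHead, pvMaxL, zero_add,
          List.foldl_cons, add_zero]
        rw [pv_foldl_max_max ss curr s, max_assoc]

-- ===== VERDICT (by name: the statement is the Claim_ definition above) =====
theorem max_Books_spec : Claim_equal_max_Books := by
  intro n k arr _
  show max_Books n k arr = max_Books_alt n k arr
  unfold max_Books max_Books_alt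
  have hA := pv_mainA k arr 0 0 (le_refl 0)
  simp only at hA
  rw [hA]
  obtain ⟨s, ss, hs⟩ : ∃ s ss, pvRunSums k arr = s :: ss := by
    cases hr : pvRunSums k arr with
    | nil => exact absurd hr (pvRunSums_ne_nil k arr)
    | cons a t => exact ⟨a, t, rfl⟩
  rw [pvSegs_eq_runSums k arr, hs]
  simp only [pvAddHead, pvMaxL, zero_add, PySem.List.max?_id_cons]
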